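-- pv_equiv track=rewrite | github.com/Szymon-Glinka/skillsComp | maze/mazeSolver.py | fixMaze
-- ===== SOURCE A (Python) =====
-- def fixMaze(mazeTofix):
--     mazeFixedPlaceholder = ""
--     mazeFixed = []
--     mazeFinal = []
--     iteration = 0
--     insertedExit = False
--
--     for line in mazeTofix: #itterate through each line in the maze
--         mazeFixedPlaceholder = ""
--
--         #================ check top and bottom of the maze ================
--         if line == mazeTofix[0] or line == mazeTofix[-1]:
--             for hash in line: #itterate through each character in top or bottom of maze
--                 if hash == ' ': #if character is a space, replace with E
--                     mazeFixedPlaceholder += "E"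
--                     insertedExit = True
--                 else: #else, keep the character
--                     mazeFixedPlaceholder += hash
--
--             mazeFixed.append(mazeFixedPlaceholder) #append the fixed line to the mazeFixed list
--
--         #================ check left and right of the maze ================
--         else:
--             lenOfline = len(line) #get length of the line
--
--             for hash in line: #itterate through each character in the line
--                 if iteration == 0 and line[0] == " " or iteration == lenOfline-1 and line[-1] == " ": #if character is a space and is the first or last character in the line, replace with E
--                     mazeFixedPlaceholder += "E"
--                     insertedExit = True
--                 else: #else, keep the character
--                     mazeFixedPlaceholder += hash
--                 iteration += 1
--
--             mazeFixed.append(mazeFixedPlaceholder) #append the fixed line to the mazeFixed list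
--             iteration = 0
--
--     #================ separate each character in each line ================
--     for line in mazeFixed:
--         mazeFinal.append(list(line))
--
--     #================ return fixed maze or error message ================
--     if insertedExit == False:
--         return "NE"
--     else:
--         return mazeFinal
-- ===== SOURCE B (Python) =====
-- def fixMaze(mazeTofix):
--     fixed = []
--     inserted = False
--     for line in mazeTofix:
--         chars = list(line)
--         if line == mazeTofix[0] or line == mazeTofix[-1]:
--             positions = range(len(chars))
--         else:
--             positions = [0, len(chars) - 1] if chars else []
--         for i in positions:
--             if chars[i] == ' ':
--                 chars[i] = 'E'
--                 inserted = True
--         fixed.append(chars)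
--     return fixed if inserted else "NE"
-- ===== Notes on version B (the rewrite author's own statement) =====
-- stated objective: simpler
-- what changed: B replaces A's per-character string building (separate border scan and middle-line scan with a manually reset position counter) by one uniform mechanism: turn the line into a char list, compute the candidate exit positions (all indices for border lines, the two endpoint indices otherwise) and patch ' ' to 'E' in place at those positions.
-- outside the precondition, e.g. on fixMaze(['##', '#.', '##']): A returns 'NE', B returns 'NE'
import Mathlib
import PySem

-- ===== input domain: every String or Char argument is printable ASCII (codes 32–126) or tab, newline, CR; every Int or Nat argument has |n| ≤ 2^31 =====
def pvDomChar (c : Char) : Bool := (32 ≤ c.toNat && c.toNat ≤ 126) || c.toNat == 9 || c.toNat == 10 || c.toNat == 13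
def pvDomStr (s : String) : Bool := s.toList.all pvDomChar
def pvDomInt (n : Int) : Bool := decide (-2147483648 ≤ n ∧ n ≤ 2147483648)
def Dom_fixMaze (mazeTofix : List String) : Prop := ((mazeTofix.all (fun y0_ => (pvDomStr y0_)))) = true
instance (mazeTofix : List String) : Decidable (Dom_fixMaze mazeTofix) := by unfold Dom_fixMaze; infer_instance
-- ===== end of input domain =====

-- B replaces A's two per-character string-building scans (border scan; middle scan with a reset
-- position counter) by one uniform patch of candidate exit positions on a char list (same cost; simpler).


-- ===== PORT A =====
-- Strings are handled on the List Char side (PySem convention); `+= ch` is `++ [ch]`.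
-- The body of A's per-line loop (a named helper; state = (mazeFixed, iteration, insertedExit)).
def fixMazeStepA (mazeTofix : List String) (st : List (List Char) × Int × Bool)
    (line : String) : List (List Char) × Int × Bool :=
  -- if line == mazeTofix[0] or line == mazeTofix[-1]
  if some line = PySem.List.pyGet? mazeTofix 0 ∨ some line = PySem.List.pyGet? mazeTofix (-1) then
    let r := line.toList.foldl
      (fun (p : List Char × Bool) h =>
        if h = ' ' then (p.1 ++ ['E'], true) else (p.1 ++ [h], p.2))
      ([], st.2.2)
    (st.1 ++ [r.1], st.2.1, r.2)
  else
    let lenOfline : Int := (line.toList.length : Int)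
    let r := line.toList.foldl
      (fun (p : List Char × Int × Bool) _h =>
        -- Python operator precedence: (iteration == 0 and line[0] == " ") or (iteration == lenOfline-1 and line[-1] == " ")
        if (p.2.1 = 0 ∧ PySem.Str.pyGet? line 0 = some ' ') ∨
           (p.2.1 = lenOfline - 1 ∧ PySem.Str.pyGet? line (-1) = some ' ') then
          (p.1 ++ ['E'], p.2.1 + 1, true)
        else (p.1 ++ [_h], p.2.1 + 1, p.2.2))
      ([], st.2.1, st.2.2)
    (st.1 ++ [r.1], 0, r.2.2)

def fixMaze (mazeTofix : List String) : List (List String) :=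
  let st := mazeTofix.foldl (fixMazeStepA mazeTofix) ([], 0, false)
  -- Python returns the string "NE" when insertedExit is False (outside Pre_); [] stands in for it here.
  if st.2.2 = false then []
  else st.1.map (fun l => l.map (fun c => String.ofList [c]))

-- ===== PORT B =====
-- The body of B's per-line loop (a named helper; state = (fixed, inserted)).
def fixMazeStepB (mazeTofix : List String) (st : List (List String) × Bool)
    (line : String) : List (List String) × Bool :=
  let chars := line.toList.map (fun c => String.ofList [c])   -- list(line)
  let positions : List Nat :=
    if some line = PySem.List.pyGet? mazeTofix 0 ∨ some line = PySem.List.pyGet? mazeTofix (-1) then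
      List.range chars.length
    else if chars = [] then [] else [0, chars.length - 1]
  -- every i in positions is in range, so chars[i] is getD i "" here
  let r := positions.foldl
    (fun (p : List String × Bool) i =>
      if p.1.getD i "" = " " then (p.1.set i "E", true) else p)
    (chars, st.2)
  (st.1 ++ [r.1], r.2)

def fixMaze_alt (mazeTofix : List String) : List (List String) :=
  let st := mazeTofix.foldl (fixMazeStepB mazeTofix) ([], false)
  -- Python returns the string "NE" when inserted is False (outside Pre_); [] stands in for it here.
  if st.2 then st.1 else []

-- ===== PRECONDITION & SPEC =====
-- Pre_ excludes exactly the mazes in which no exit gets inserted: there Python A returns the string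
-- "NE", which is not a value of the declared List (List String) type (B returns "NE" there too).
def Pre_fixMaze (mazeTofix : List String) : Prop :=
  ∃ line ∈ mazeTofix,
    if some line = PySem.List.pyGet? mazeTofix 0 ∨ some line = PySem.List.pyGet? mazeTofix (-1) then
      ' ' ∈ line.toList
    else
      line.toList.head? = some ' ' ∨ line.toList.getLast? = some ' '
instance (mazeTofix : List String) : Decidable (Pre_fixMaze mazeTofix) := by
  unfold Pre_fixMaze; infer_instance

def pvWitness_fixMaze : List String := ["# #", "  #", "###"]

def Spec_fixMaze (mazeTofix : List String) (out : List (List String)) : Prop := out = fixMaze_alt mazeTofix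
instance (mazeTofix : List String) (out : List (List String)) : Decidable (Spec_fixMaze mazeTofix out) := by unfold Spec_fixMaze; infer_instance

-- ===== CLAIM (what is proved, stated in full; the proofs are below) =====
def Claim_equal_fixMaze : Prop := ∀ (mazeTofix : List String), Dom_fixMaze mazeTofix → Pre_fixMaze mazeTofix → Spec_fixMaze mazeTofix (fixMaze mazeTofix)

-- ===== LEMMAS AND PROOFS =====

def pvSing (c : Char) : String := String.ofList [c]
def pvSub (c : Char) : Char := if c = ' ' then 'E' else c
def pvSubS (s : String) : String := if s = " " then "E" else s

theorem pvSing_eq_space (c : Char) : (pvSing c = " ") = (c = ' ') := by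
  simp only [pvSing, eq_iff_iff]
  constructor
  · intro h; have := congrArg String.toList h; simpa using this
  · rintro rfl; rfl

theorem pvSing_sub (c : Char) : pvSing (pvSub c) = pvSubS (pvSing c) := by
  by_cases h : c = ' '
  · subst h; rfl
  · simp [pvSub, pvSubS, h, pvSing_eq_space]

theorem pvBorderA (cs : List Char) : ∀ (acc : List Char) (ins : Bool),
    cs.foldl (fun (p : List Char × Bool) h =>
        if h = ' ' then (p.1 ++ ['E'], true) else (p.1 ++ [h], p.2)) (acc, ins)
      = (acc ++ cs.map pvSub, ins || cs.any (· = ' ')) := by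
  induction cs with
  | nil => simp
  | cons c cs ih =>
    intro acc ins
    by_cases h : c = ' ' <;> simp [h, ih, pvSub]

theorem pvRangePatch (l : List String) : ∀ (k : Nat), k ≤ l.length → ∀ (ins : Bool),
    (List.range k).foldl (fun (p : List String × Bool) i =>
        if p.1.getD i "" = " " then (p.1.set i "E", true) else p) (l, ins)
      = ((l.take k).map pvSubS ++ l.drop k, ins || (l.take k).any (· = " ")) := by
  intro k
  induction k with
  | zero => simp
  | succ k ih =>
    intro hk ins
    rw [List.range_succ, List.foldl_append, ih (by omega)]
    have hk' : k < l.length := by omega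
    have htk : ((l.take k).map pvSubS).length = k := by
      simp [List.length_take]; omega
    have hdrop : l.drop k = l[k] :: l.drop (k+1) := List.drop_eq_getElem_cons hk'
    have hget : ((l.take k).map pvSubS ++ l.drop k).getD k "" = l[k] := by
      rw [List.getD_eq_getElem?_getD, List.getElem?_append_right htk.le, htk, Nat.sub_self,
        hdrop]
      rfl
    have hset : ((l.take k).map pvSubS ++ l.drop k).set k "E" =
        (l.take k).map pvSubS ++ "E" :: l.drop (k+1) := by
      rw [List.set_append, if_neg (by omega), htk, Nat.sub_self, hdrop]
      rfl
    have htk1 : l.take (k+1) = l.take k ++ [l[k]] := by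
      rw [List.take_add_one]; simp [List.getElem?_eq_getElem hk']
    simp only [List.foldl_cons, List.foldl_nil, hget, htk1, List.map_append, List.map_cons,
      List.map_nil, List.any_append, List.any_cons, List.any_nil]
    by_cases hsp : l[k] = " "
    · rw [if_pos hsp, hset]
      have h1 : pvSubS l[k] = "E" := by rw [pvSubS, if_pos hsp]
      have h2 : decide (l[k] = " ") = true := decide_eq_true hsp
      rw [h1, h2]
      simp
    · rw [if_neg hsp]
      have h1 : pvSubS l[k] = l[k] := by rw [pvSubS, if_neg hsp]
      have h2 : decide (l[k] = " ") = false := decide_eq_false hsp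
      rw [h1, h2, hdrop]
      simp

theorem pvMidA (P0 P1 : Prop) [inst0 : Decidable P0] [inst1 : Decidable P1] (n : Int)
    (cs : List Char) : ∀ (acc : List Char) (j : Nat) (ins : Bool),
    cs.foldl (fun (p : List Char × Int × Bool) _h =>
        if (p.2.1 = 0 ∧ P0) ∨ (p.2.1 = n - 1 ∧ P1) then
          (p.1 ++ ['E'], p.2.1 + 1, true)
        else (p.1 ++ [_h], p.2.1 + 1, p.2.2)) (acc, (j : Int), ins)
      = (acc ++ (cs.zipIdx j).map (fun p =>
            if (p.2 = 0 ∧ P0) ∨ ((p.2 : Int) = n - 1 ∧ P1) then 'E' else p.1),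
         ((j + cs.length : Nat) : Int),
         ins || (cs.zipIdx j).any fun p =>
            decide ((p.2 = 0 ∧ P0) ∨ ((p.2 : Int) = n - 1 ∧ P1))) := by
  induction cs with
  | nil => simp
  | cons c cs ih =>
    intro acc j ins
    have hj1 : ((j : Int) + 1) = ((j + 1 : Nat) : Int) := by push_cast; ring
    simp only [List.foldl_cons, List.zipIdx_cons, List.map_cons, List.any_cons]
    by_cases hcI : ((j : Int) = 0 ∧ P0) ∨ ((j : Int) = n - 1 ∧ P1)
    · have hcN : (j = 0 ∧ P0) ∨ ((j : Int) = n - 1 ∧ P1) := by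
        rcases hcI with ⟨h, hp⟩ | h
        · exact Or.inl ⟨by exact_mod_cast h, hp⟩
        · exact Or.inr h
      rw [if_pos hcI, hj1, ih]
      simp only [Prod.mk.injEq]
      refine ⟨?_, ?_, ?_⟩
      · rw [if_pos hcN]; simp
      · simp only [List.length_cons]; push_cast; ring
      · rw [decide_eq_true hcN]; simp
    · have hcN : ¬((j = 0 ∧ P0) ∨ ((j : Int) = n - 1 ∧ P1)) := by
        intro h
        apply hcI
        rcases h with ⟨h, hp⟩ | h
        · exact Or.inl ⟨by exact_mod_cast h, hp⟩
        · exact Or.inr h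
      rw [if_neg hcI, hj1, ih]
      simp only [Prod.mk.injEq]
      refine ⟨?_, ?_, ?_⟩
      · rw [if_neg hcN]; simp
      · simp only [List.length_cons]; push_cast; ring
      · rw [decide_eq_false hcN]; simp

theorem pvMidMiddle (P0 P1 : Prop) [inst0 : Decidable P0] [inst1 : Decidable P1] (n : Int)
    (ds : List Char) : ∀ (j : Nat), 1 ≤ j → ((j + ds.length : Nat) : Int) ≤ n - 1 →
    ((ds.zipIdx j).map (fun p =>
        if (p.2 = 0 ∧ P0) ∨ ((p.2 : Int) = n - 1 ∧ P1) then 'E' else p.1) = ds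
     ∧ (ds.zipIdx j).any (fun p =>
        decide ((p.2 = 0 ∧ P0) ∨ ((p.2 : Int) = n - 1 ∧ P1))) = false) := by
  induction ds with
  | nil => simp
  | cons d ds ih =>
    intro j hj hle
    simp only [List.length_cons] at hle
    push_cast at hle
    have hjn : ¬((j : Int) = n - 1) := by omega
    have hcond : ¬((j = 0 ∧ P0) ∨ ((j : Int) = n - 1 ∧ P1)) := by
      rintro (⟨h, _⟩ | ⟨h, _⟩)
      · omega
      · exact hjn h
    obtain ⟨ih1, ih2⟩ := ih (j + 1) (by omega) (by push_cast; omega)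
    simp only [List.zipIdx_cons, List.map_cons, List.any_cons]
    rw [if_neg hcond, decide_eq_false hcond]
    exact ⟨by rw [ih1], by rw [Bool.false_or, ih2]⟩

theorem pvMidA0 (P0 P1 : Prop) [inst0 : Decidable P0] [inst1 : Decidable P1] (n : Int)
    (cs : List Char) (ins : Bool) :
    cs.foldl (fun (p : List Char × Int × Bool) _h =>
        if (p.2.1 = 0 ∧ P0) ∨ (p.2.1 = n - 1 ∧ P1) then
          (p.1 ++ ['E'], p.2.1 + 1, true)
        else (p.1 ++ [_h], p.2.1 + 1, p.2.2)) ([], (0 : Int), ins)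
      = ((cs.zipIdx).map (fun p =>
            if (p.2 = 0 ∧ P0) ∨ ((p.2 : Int) = n - 1 ∧ P1) then 'E' else p.1),
         (cs.length : Int),
         ins || (cs.zipIdx).any fun p =>
            decide ((p.2 = 0 ∧ P0) ∨ ((p.2 : Int) = n - 1 ∧ P1))) := by
  have h := pvMidA P0 P1 n cs [] 0 ins
  simpa using h

theorem pvPyGet0 (line : String) : (PySem.Str.pyGet? line 0 = some ' ') ↔ line.toList.head? = some ' ' := by
  rcases h : line.toList with _ | ⟨c, t⟩ <;>
    simp [PySem.Str.pyGet?, PySem.Chars.pyGet?, PySem.List.pyGet?, PySem.List.pyIdx?, h]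

theorem pvPyGetNeg1 (line : String) : (PySem.Str.pyGet? line (-1) = some ' ') ↔ line.toList.getLast? = some ' ' := by
  rcases h : line.toList with _ | ⟨c, t⟩
  · simp [PySem.Str.pyGet?, PySem.Chars.pyGet?, PySem.List.pyGet?, PySem.List.pyIdx?, h]
  · simp [PySem.Str.pyGet?, PySem.Chars.pyGet?, PySem.List.pyGet?, PySem.List.pyIdx?, h,
      List.getLast?_eq_getElem?]

theorem pvBorderAgree (cs : List Char) :
    ((cs.map pvSub).map pvSing = (cs.map pvSing).map pvSubS)
      ∧ (cs.any (· = ' ') = (cs.map pvSing).any (· = " ")) := by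
  constructor
  · simp [List.map_map, Function.comp, pvSing_sub]
  · simp [List.any_map, Function.comp_def, pvSing_eq_space]

theorem pvMidAgree (P0 P1 : Prop) [inst0 : Decidable P0] [inst1 : Decidable P1]
    (cs : List Char) (ins : Bool)
    (hP0 : P0 ↔ cs.head? = some ' ') (hP1 : P1 ↔ cs.getLast? = some ' ') :
    ∀ (rA : List Char × Int × Bool) (rB : List String × Bool),
    rA = cs.foldl (fun (p : List Char × Int × Bool) _h =>
        if (p.2.1 = 0 ∧ P0) ∨ (p.2.1 = (cs.length : Int) - 1 ∧ P1) then
          (p.1 ++ ['E'], p.2.1 + 1, true)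
        else (p.1 ++ [_h], p.2.1 + 1, p.2.2)) ([], (0 : Int), ins) →
    rB = (if cs.map pvSing = [] then ([] : List Nat)
          else [0, (cs.map pvSing).length - 1]).foldl
          (fun (p : List String × Bool) i =>
            if p.1.getD i "" = " " then (p.1.set i "E", true) else p)
          (cs.map pvSing, ins) →
    rA.1.map pvSing = rB.1 ∧ rA.2.2 = rB.2 := by
  intro rA rB hA hB
  subst hA hB
  rw [pvMidA0 P0 P1 (cs.length : Int) cs ins]
  rcases eq_or_ne cs [] with rfl | hne
  · simp
  · obtain ⟨c, t, rfl⟩ := List.exists_cons_of_ne_nil hne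
    have h0 : P0 ↔ c = ' ' := by simpa using hP0
    rcases t.eq_nil_or_concat with rfl | ⟨ds, e, rfl⟩
    · -- single-character line
      have h1 : P1 ↔ c = ' ' := by simpa using hP1
      by_cases hc : c = ' '
      · have hp0 : P0 := h0.mpr hc
        subst hc
        simp [hp0, pvSing]
      · have hp0 : ¬P0 := fun h => hc (h0.mp h)
        have hp1 : ¬P1 := fun h => hc (h1.mp h)
        simp [hp0, hp1, pvSing_eq_space, hc]
    · -- at least two characters: c :: ds ++ [e]
      simp only [List.concat_eq_append] at hP0 hP1 hne ⊢
      have hlast : (c :: (ds ++ [e])).getLast? = some e := by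
        rw [← List.cons_append, List.getLast?_concat]
      have h1 : P1 ↔ e = ' ' := by rw [hlast] at hP1; simpa using hP1
      have hlen : ((c :: (ds ++ [e])).length : Int) = (ds.length : Int) + 2 := by
        simp; omega
      have hz : (c :: (ds ++ [e])).zipIdx = (c, 0) :: (ds.zipIdx 1 ++ [(e, 1 + ds.length)]) := by
        simp [List.zipIdx_append, List.zipIdx_cons]
      obtain ⟨hmid1, hmid2⟩ := pvMidMiddle P0 P1 ((c :: (ds ++ [e])).length : Int) ds 1
        (by omega) (by rw [hlen]; push_cast; omega)
      have hc0 : ¬(((0 : Nat) : Int) = ((c :: (ds ++ [e])).length : Int) - 1) := by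
        rw [hlen]; push_cast; omega
      have hce : ((1 + ds.length : Nat) : Int) = ((c :: (ds ++ [e])).length : Int) - 1 := by
        rw [hlen]; push_cast; omega
      have hgetD2 : ∀ x : String,
          ((x :: (ds.map pvSing ++ [pvSing e])).getD (ds.length + 1) "") = pvSing e := by
        intro x
        rw [List.getD_eq_getElem?_getD]
        simp
      have hset2 : ∀ x : String,
          ((x :: (ds.map pvSing ++ [pvSing e])).set (ds.length + 1) "E")
            = x :: (ds.map pvSing ++ ["E"]) := by
        intro x
        simp
      rw [hz]
      simp only [List.map_cons, List.map_append, List.any_cons, List.any_append,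
        List.map_nil, List.any_nil, hmid1, hmid2]
      have hz0 : ¬((0 : Int) = (ds.length : Int) + 1) := by omega
      have hz1 : ((1 + ds.length : Nat) : Int) = (ds.length : Int) + 1 := by push_cast; ring
      have hEE : pvSing 'E' = "E" := rfl
      have hSS : pvSing ' ' = " " := rfl
      by_cases hcsp : c = ' ' <;> by_cases hesp : e = ' '
      · have hp0 : P0 := h0.mpr hcsp
        have hp1 : P1 := h1.mpr hesp
        simp [hp0, hp1, hce, hcsp, hesp, hEE, hSS, hz0]
      · have hp0 : P0 := h0.mpr hcsp
        have hp1 : ¬P1 := fun h => hesp (h1.mp h)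
        simp [hp0, hp1, hce, pvSing_eq_space, hcsp, hesp, hEE, hSS, hz0]
      · have hp0 : ¬P0 := fun h => hcsp (h0.mp h)
        have hp1 : P1 := h1.mpr hesp
        simp [hp0, hp1, hce, pvSing_eq_space, hcsp, hesp, hEE, hSS, hz0]
      · have hp0 : ¬P0 := fun h => hcsp (h0.mp h)
        have hp1 : ¬P1 := fun h => hesp (h1.mp h)
        simp [hp0, hp1, hce, pvSing_eq_space, hcsp, hesp, hz0]

theorem pvFoldAgree (maze : List String) (lines : List String) :
    ∀ (accA : List (List Char) × Int × Bool) (accB : List (List String) × Bool),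
    accB.1 = accA.1.map (fun l => l.map pvSing) → accA.2.1 = 0 → accB.2 = accA.2.2 →
    (lines.foldl (fixMazeStepB maze) accB).1
        = (lines.foldl (fixMazeStepA maze) accA).1.map (fun l => l.map pvSing)
      ∧ (lines.foldl (fixMazeStepB maze) accB).2
        = (lines.foldl (fixMazeStepA maze) accA).2.2 := by
  induction lines with
  | nil =>
    intro accA accB h1 _h2 h3
    exact ⟨h1, h3⟩
  | cons line rest ih =>
    intro accA accB h1 h2 h3
    simp only [List.foldl_cons]
    apply ih
    · -- list components of the stepped states agree
      simp only [fixMazeStepA, fixMazeStepB]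
      rw [show (fun c : Char => String.ofList [c]) = pvSing from rfl]
      by_cases hb : some line = PySem.List.pyGet? maze 0 ∨ some line = PySem.List.pyGet? maze (-1)
      · rw [if_pos hb, if_pos hb, h3, pvBorderA,
          pvRangePatch (line.toList.map pvSing) (line.toList.map pvSing).length le_rfl accA.2.2]
        simp only [List.take_length, List.drop_length, List.append_nil, List.nil_append]
        obtain ⟨hb1, _⟩ := pvBorderAgree line.toList
        rw [h1, List.map_append, List.map_cons, List.map_nil, hb1]
      · rw [if_neg hb, if_neg hb, h2, h3]
        obtain ⟨hm1, _⟩ := pvMidAgree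
          (PySem.Str.pyGet? line 0 = some ' ') (PySem.Str.pyGet? line (-1) = some ' ')
          line.toList accA.2.2 (pvPyGet0 line) (pvPyGetNeg1 line) _ _ rfl rfl
        dsimp only
        rw [h1, List.map_append, List.map_cons, List.map_nil, hm1]
    · -- iteration is reset to 0 after every line
      simp only [fixMazeStepA]
      by_cases hb : some line = PySem.List.pyGet? maze 0 ∨ some line = PySem.List.pyGet? maze (-1)
      · rw [if_pos hb]; exact h2
      · rw [if_neg hb]
    · -- inserted flags agree after the step
      simp only [fixMazeStepA, fixMazeStepB]
      rw [show (fun c : Char => String.ofList [c]) = pvSing from rfl]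
      by_cases hb : some line = PySem.List.pyGet? maze 0 ∨ some line = PySem.List.pyGet? maze (-1)
      · rw [if_pos hb, if_pos hb, h3, pvBorderA,
          pvRangePatch (line.toList.map pvSing) (line.toList.map pvSing).length le_rfl accA.2.2]
        simp only [List.take_length]
        obtain ⟨_, hb2⟩ := pvBorderAgree line.toList
        rw [hb2]
      · rw [if_neg hb, if_neg hb, h2, h3]
        obtain ⟨_, hm2⟩ := pvMidAgree
          (PySem.Str.pyGet? line 0 = some ' ') (PySem.Str.pyGet? line (-1) = some ' ')
          line.toList accA.2.2 (pvPyGet0 line) (pvPyGetNeg1 line) _ _ rfl rfl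
        exact hm2.symm

-- ===== VERDICT (by name: the statement is the Claim_ definition above) =====
theorem fixMaze_spec : Claim_equal_fixMaze := by
  intro maze _hdom _hpre
  unfold Spec_fixMaze
  simp only [fixMaze, fixMaze_alt]
  obtain ⟨h1, h2⟩ := pvFoldAgree maze maze ([], (0 : Int), false) ([], false) rfl rfl rfl
  rw [show (fun c : Char => String.ofList [c]) = pvSing from rfl]
  rw [h1, h2]
  rcases (maze.foldl (fixMazeStepA maze) ([], (0 : Int), false)).2.2 with _ | _ <;> simp
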